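-- pv_equiv track=rewrite | github.com/acadTags/multilabel-BERTs | multilabel_bert_util.py | transform_multilabel_as_multihot_new
-- ===== SOURCE A (Python) =====
-- def transform_multilabel_as_multihot_new(label_list_str,label_list_sorted):
--     result = []
--     for label in label_list_sorted:
--         if label in label_list_str:
--             result.append(1)
--         else:
--             result.append(0)
--     return result
-- ===== SOURCE B (Python) =====
-- def transform_multilabel_as_multihot_new(label_list_str, label_list_sorted):
--     # Inverted traversal: index the sorted labels by position once, then mark
--     # hits while scanning label_list_str a single time.
--     pos = {}
--     for i, label in enumerate(label_list_sorted):
--         pos[label] = pos.get(label, []) + [i]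
--     result = [0] * len(label_list_sorted)
--     for label in label_list_str:
--         for i in pos.get(label, []):
--             result[i] = 1
--     return result
-- ===== Notes on version B (the rewrite author's own statement) =====
-- stated objective: faster
-- what changed: B builds a dict from each label to its list of positions in label_list_sorted once, then makes a single pass over label_list_str setting result[i]=1, instead of scanning label_list_str for every sorted label.
import Mathlib
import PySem

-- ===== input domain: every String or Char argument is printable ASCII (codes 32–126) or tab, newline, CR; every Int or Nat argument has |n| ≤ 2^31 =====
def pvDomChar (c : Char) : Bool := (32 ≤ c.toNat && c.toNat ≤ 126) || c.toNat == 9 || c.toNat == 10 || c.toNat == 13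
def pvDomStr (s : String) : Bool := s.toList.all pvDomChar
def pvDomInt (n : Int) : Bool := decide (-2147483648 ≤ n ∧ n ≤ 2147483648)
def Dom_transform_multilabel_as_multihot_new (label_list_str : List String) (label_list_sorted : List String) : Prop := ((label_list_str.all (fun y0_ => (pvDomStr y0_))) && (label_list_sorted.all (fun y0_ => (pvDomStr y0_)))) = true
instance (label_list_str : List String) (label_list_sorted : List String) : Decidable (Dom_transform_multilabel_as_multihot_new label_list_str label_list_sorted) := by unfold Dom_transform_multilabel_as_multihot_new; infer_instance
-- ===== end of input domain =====

-- B replaces A's per-label scan of label_list_str by a position index over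
-- label_list_sorted built once, then a single marking pass over label_list_str.

-- ===== PORT A =====
-- for label in label_list_sorted: result.append(1 if label in label_list_str else 0)
def transform_multilabel_as_multihot_new (label_list_str : List String) (label_list_sorted : List String) : List Int :=
  label_list_sorted.foldl
    (fun result label => if label ∈ label_list_str then result ++ [1] else result ++ [0]) []

-- ===== PORT B =====
-- pos[label] = pos.get(label, []) + [i] over enumerate(label_list_sorted)
def pvPos (label_list_sorted : List String) : PySem.Dict String (List Int) :=
  (PySem.List.enumerate label_list_sorted 0).foldl
    (fun pos p => pos.insert p.2 (pos.getD p.2 [] ++ [p.1])) PySem.Dict.empty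

def transform_multilabel_as_multihot_new_alt (label_list_str : List String) (label_list_sorted : List String) : List Int :=
  let pos := pvPos label_list_sorted
  let init : List Int := List.replicate label_list_sorted.length 0
  label_list_str.foldl
    (fun result label =>
      (pos.getD label []).foldl (fun result i => PySem.List.pySetD result i 1) result) init

-- ===== PRECONDITION & SPEC =====
def Spec_transform_multilabel_as_multihot_new (label_list_str : List String) (label_list_sorted : List String) (out : List Int) : Prop := out = transform_multilabel_as_multihot_new_alt label_list_str label_list_sorted
instance (label_list_str : List String) (label_list_sorted : List String) (out : List Int) : Decidable (Spec_transform_multilabel_as_multihot_new label_list_str label_list_sorted out) := by unfold Spec_transform_multilabel_as_multihot_new; infer_instance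

-- ===== CLAIM (what is proved, stated in full; the proofs are below) =====
def Claim_equal_transform_multilabel_as_multihot_new : Prop := ∀ (label_list_str : List String) (label_list_sorted : List String), Dom_transform_multilabel_as_multihot_new label_list_str label_list_sorted → Spec_transform_multilabel_as_multihot_new label_list_str label_list_sorted (transform_multilabel_as_multihot_new label_list_str label_list_sorted)

-- ===== LEMMAS AND PROOFS =====

-- A's foldl-append loop is a map.
theorem foldl_append_bit (str : List String) (sorted : List String) (acc : List Int) :
    sorted.foldl (fun result label => if label ∈ str then result ++ [1] else result ++ [0]) acc
      = acc ++ sorted.map (fun label => if label ∈ str then (1 : Int) else 0) := by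
  induction sorted generalizing acc with
  | nil => simp
  | cons a t ih => by_cases h : a ∈ str <;> simp [h, ih]

theorem portA_eq_map (str sorted : List String) :
    transform_multilabel_as_multihot_new str sorted
      = sorted.map (fun label => if label ∈ str then (1 : Int) else 0) := by
  unfold transform_multilabel_as_multihot_new
  simpa using foldl_append_bit str sorted []

-- Characterisation of the position index built by B's first loop.
theorem pvPos_getD (pairs : List (Int × String)) (d : PySem.Dict String (List Int)) (lab : String) :
    ((pairs.foldl (fun pos p => pos.insert p.2 (pos.getD p.2 [] ++ [p.1])) d).getD lab [])
      = d.getD lab [] ++ (pairs.filter (fun p => p.2 = lab)).map (·.1) := by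
  induction pairs generalizing d with
  | nil => simp
  | cons p rest ih =>
    simp only [List.foldl_cons, List.filter_cons, ih]
    by_cases h : p.2 = lab
    · simp [h]
    · simp [h, PySem.Dict.getD_insert, Ne.symm h]

theorem mem_pvPos_getD (sorted : List String) (lab : String) (i : Int) :
    i ∈ (pvPos sorted).getD lab []
      ↔ ∃ (k : Nat) (hk : k < sorted.length), i = (k : Int) ∧ sorted[k] = lab := by
  unfold pvPos
  rw [pvPos_getD]
  simp only [PySem.Dict.getD_empty, List.nil_append, List.mem_map, List.mem_filter]
  constructor
  · rintro ⟨p, ⟨hp, hlab⟩, rfl⟩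
    rcases (PySem.List.mem_enumerate_iff _ _ _).1 hp with ⟨k, hk, rfl⟩
    exact ⟨k, hk, by simp, by simpa using hlab⟩
  · rintro ⟨k, hk, rfl, hlab⟩
    refine ⟨((k : Int), sorted[k]), ⟨?_, by simpa using hlab⟩, rfl⟩
    exact (PySem.List.mem_enumerate_iff _ _ _).2 ⟨k, hk, by simp⟩

-- Inner marking loop: sets exactly the listed (nonnegative) indices to 1.
theorem inner_fold_getElem? (is : List Int) (r : List Int) (j : Nat)
    (hnn : ∀ i ∈ is, ∃ k : Nat, i = (k : Int)) :
    (is.foldl (fun r i => PySem.List.pySetD r i 1) r).length = r.length ∧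
    (is.foldl (fun r i => PySem.List.pySetD r i 1) r)[j]?
      = if (j : Int) ∈ is ∧ j < r.length then some 1 else r[j]? := by
  induction is generalizing r with
  | nil => simp
  | cons i t ih =>
    obtain ⟨k, rfl⟩ := hnn i (List.mem_cons_self ..)
    have hstep : PySem.List.pySetD r (k : Int) 1 = r.set k 1 := PySem.List.pySetD_natCast ..
    simp only [List.foldl_cons, hstep]
    obtain ⟨hlen, hget⟩ := ih (r.set k 1) (fun i hi => hnn i (List.mem_cons_of_mem _ hi))
    refine ⟨by simpa using hlen, ?_⟩
    rw [hget, List.length_set]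
    by_cases hkj : k = j
    · subst hkj
      by_cases hjr : k < r.length
      · by_cases hjt : ((k : Int) ∈ t) <;> simp [hjr, hjt]
      · have h1 : (r.set k 1)[k]? = none := by
          simp; omega
        have h2 : r[k]? = none := by simp; omega
        simp [hjr]
    · have hjk : ¬ (j = k) := fun h => hkj h.symm
      have hset : (r.set k 1)[j]? = r[j]? := by
        rw [List.getElem?_set]; simp [hkj]
      by_cases hjt : ((j : Int) ∈ t) <;> by_cases hjr : j < r.length <;>
        simp [hjt, hjr, hjk, List.getElem_set_ne, hkj]

-- Outer loop invariant: after B's marking pass, entry j is 1 exactly when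
-- sorted[j] occurred among the processed labels.
theorem outer_fold_getElem? (str sorted : List String) (r : List Int)
    (hr : r.length = sorted.length) :
    (str.foldl (fun result label =>
        ((pvPos sorted).getD label []).foldl
          (fun result i => PySem.List.pySetD result i 1) result) r).length = sorted.length ∧
    ∀ (j : Nat) (hj : j < sorted.length),
      (str.foldl (fun result label =>
          ((pvPos sorted).getD label []).foldl
            (fun result i => PySem.List.pySetD result i 1) result) r)[j]?
        = if sorted[j] ∈ str then some 1 else r[j]? := by
  induction str generalizing r with
  | nil => exact ⟨hr, fun j hj => by simp⟩
  | cons lab rest ih =>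
    simp only [List.foldl_cons]
    have hnn : ∀ i ∈ (pvPos sorted).getD lab [], ∃ k : Nat, i = (k : Int) := by
      intro i hi
      obtain ⟨k, hk, rfl, -⟩ := (mem_pvPos_getD sorted lab i).1 hi
      exact ⟨k, rfl⟩
    set r' := ((pvPos sorted).getD lab []).foldl (fun result i => PySem.List.pySetD result i 1) r with hr'def
    have hlen' : r'.length = r.length := (inner_fold_getElem? _ r 0 hnn).1
    obtain ⟨hlenF, hgetF⟩ := ih r' (hlen'.trans hr)
    refine ⟨hlenF, fun j hj => ?_⟩
    have hmem : (j : Int) ∈ (pvPos sorted).getD lab [] ↔ sorted[j] = lab := by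
      rw [mem_pvPos_getD]
      constructor
      · rintro ⟨k, hk, hjk, hlab⟩
        have hjkn : j = k := by exact_mod_cast hjk
        subst hjkn
        exact hlab
      · intro h
        exact ⟨j, hj, rfl, h⟩
    have hr'j : r'[j]? = if sorted[j] = lab then some 1 else r[j]? := by
      rw [hr'def, (inner_fold_getElem? _ r j hnn).2]
      by_cases h : sorted[j] = lab
      · simp [hmem.2 h, h, hr ▸ hj]
      · have hm : (j : Int) ∉ (pvPos sorted).getD lab [] := fun hc => h (hmem.1 hc)
        simp [hm, h]
    rw [hgetF j hj, hr'j]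
    by_cases h2 : sorted[j] ∈ rest
    · simp [h2, List.mem_cons]
    · by_cases h1 : sorted[j] = lab <;> simp [h1, h2, List.mem_cons]

-- ===== VERDICT (by name: the statement is the Claim_ definition above) =====
theorem transform_multilabel_as_multihot_new_spec : Claim_equal_transform_multilabel_as_multihot_new := by
  intro str sorted _
  unfold Spec_transform_multilabel_as_multihot_new
  simp only [transform_multilabel_as_multihot_new_alt]
  obtain ⟨hlen, hget⟩ := outer_fold_getElem? str sorted (List.replicate sorted.length 0) (by simp)
  rw [portA_eq_map]
  apply List.ext_getElem?
  intro j
  by_cases hj : j < sorted.length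
  · rw [hget j hj, List.getElem?_map, List.getElem?_eq_getElem hj]
    by_cases h : sorted[j] ∈ str <;> simp [h, hj]
  · rw [List.getElem?_eq_none (by simpa using Nat.le_of_not_lt hj),
        List.getElem?_eq_none (by rw [hlen]; omega)]
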